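-- pv_equiv track=rewrite | github.com/sadscv/NLP_assignment | wordSegment/utils.py | convert_predicts_to_segments
-- ===== SOURCE A (Python) =====
-- def convert_predicts_to_segments(predicts, seq):
--     assert len(predicts) == len(seq)
--     i = 0
--     segs = []
--     while(i < len(seq)):
--         if predicts[i] == 0:
--             j = i + 1
--             while(j < len(seq) and predicts[j] != 2):
--                 j += 1
--             if j == len(seq):
--                 segs.append(seq[i:j])
--             else:
--                 segs.append(seq[i:j+1])
--             i = j + 1
--         if i < len(seq) and predicts[i] != 0:
--             segs.append(seq[i])
--             i += 1
--     return segs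
-- ===== SOURCE B (Python) =====
-- def convert_predicts_to_segments(predicts, seq):
--     assert len(predicts) == len(seq)
--     segs = []
--     start = None
--     for i in range(len(seq)):
--         if start is None:
--             if predicts[i] == 0:
--                 start = i
--             else:
--                 segs.append(seq[i])
--         elif predicts[i] == 2:
--             segs.append(seq[start:i + 1])
--             start = None
--     if start is not None:
--         segs.append(seq[start:])
--     return segs
-- ===== Notes on version B (the rewrite author's own statement) =====
-- stated objective: simpler
-- what changed: Replaced the nested inner while-lookahead with index jumping by a single flat forward pass maintaining an Optional word-start state, flushing words on end labels and once after the loop.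
import Mathlib
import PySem

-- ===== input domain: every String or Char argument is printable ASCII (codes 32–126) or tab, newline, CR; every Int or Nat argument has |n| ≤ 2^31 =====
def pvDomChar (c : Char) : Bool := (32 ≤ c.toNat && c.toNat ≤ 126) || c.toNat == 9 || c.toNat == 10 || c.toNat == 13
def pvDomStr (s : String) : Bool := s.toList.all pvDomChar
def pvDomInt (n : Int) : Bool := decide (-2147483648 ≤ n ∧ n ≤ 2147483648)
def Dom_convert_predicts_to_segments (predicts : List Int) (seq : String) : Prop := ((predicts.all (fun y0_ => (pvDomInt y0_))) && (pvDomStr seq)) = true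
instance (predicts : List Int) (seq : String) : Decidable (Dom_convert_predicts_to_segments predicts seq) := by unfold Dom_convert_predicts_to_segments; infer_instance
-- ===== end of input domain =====

-- B replaces A's nested inner while-lookahead (with index jumping) by a single flat forward
-- pass keeping an Option word-start state; same values, same cost; no speed claim.
-- Both ports work on seq.toList; indices stay in range (lengths equal by Pre_), so
-- List.getD / drop+take are exact for Python's predicts[i] and seq[a:b] here.

-- seq[a:b] for 0 ≤ a ≤ b ≤ len: exact as drop/take
def pvSlice (s : List Char) (a b : Nat) : String := String.ofList ((s.drop a).take (b - a))

-- ===== PORT A =====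
-- inner: while j < len(seq) and predicts[j] != 2: j += 1
def pvLoopJ (p : List Int) (n : Nat) (j : Nat) : Nat :=
  if h : j < n ∧ p.getD j 0 ≠ 2 then pvLoopJ p n (j + 1) else j
termination_by n - j
decreasing_by exact Nat.sub_lt_sub_left h.1 (Nat.lt_succ_self j)

theorem pvLoopJ_ge (p : List Int) (n j : Nat) : j ≤ pvLoopJ p n j := by
  unfold pvLoopJ
  split
  · exact le_trans (Nat.le_succ j) (pvLoopJ_ge p n (j + 1))
  · exact le_refl j
termination_by n - j
decreasing_by exact Nat.sub_lt_sub_left ‹j < n ∧ p.getD j 0 ≠ 2›.1 (Nat.lt_succ_self j)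

-- outer while loop of A; the trailing `if i < len(seq) and predicts[i] != 0` of the Python
-- body appears once in each branch because Lean has no mid-loop mutation of i/segs.
def pvLoopA (p : List Int) (s : List Char) (i : Nat) (segs : List String) : List String :=
  if hi : i < s.length then
    if p.getD i 0 = 0 then
      let j := pvLoopJ p s.length (i + 1)
      let segs1 := if j = s.length then segs ++ [pvSlice s i j] else segs ++ [pvSlice s i (j + 1)]
      if j + 1 < s.length ∧ p.getD (j + 1) 0 ≠ 0 then
        pvLoopA p s (j + 2) (segs1 ++ [pvSlice s (j + 1) (j + 2)])
      else
        pvLoopA p s (j + 1) segs1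
    else
      pvLoopA p s (i + 1) (segs ++ [pvSlice s i (i + 1)])
  else segs
termination_by s.length - i
decreasing_by
  · exact Nat.sub_lt_sub_left hi (Nat.lt_of_lt_of_le (Nat.lt_of_succ_le (pvLoopJ_ge p s.length (i + 1))) (Nat.le_add_right _ 2))
  · exact Nat.sub_lt_sub_left hi (Nat.lt_of_lt_of_le (Nat.lt_of_succ_le (pvLoopJ_ge p s.length (i + 1))) (Nat.le_add_right _ 1))
  · exact Nat.sub_lt_sub_left hi (Nat.lt_succ_self i)

def convert_predicts_to_segments (predicts : List Int) (seq : String) : List String :=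
  pvLoopA predicts seq.toList 0 []

-- ===== PORT B =====
-- flat pass: st = none ↦ outside a word, st = some a ↦ word open since index a
def pvGoB (p : List Int) (s : List Char) (i : Nat) (st : Option Nat) (segs : List String) : List String :=
  if hi : i < s.length then
    match st with
    | none =>
      if p.getD i 0 = 0 then pvGoB p s (i + 1) (some i) segs
      else pvGoB p s (i + 1) none (segs ++ [pvSlice s i (i + 1)])
    | some a =>
      if p.getD i 0 = 2 then pvGoB p s (i + 1) none (segs ++ [pvSlice s a (i + 1)])
      else pvGoB p s (i + 1) (some a) segs
  else
    match st with
    | none => segs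
    | some a => segs ++ [pvSlice s a s.length]
termination_by s.length - i
decreasing_by all_goals exact Nat.sub_lt_sub_left hi (Nat.lt_succ_self i)

def convert_predicts_to_segments_alt (predicts : List Int) (seq : String) : List String :=
  pvGoB predicts seq.toList 0 none []

-- ===== PRECONDITION & SPEC =====
-- Pre_ excludes exactly the inputs where A's assert fails (AssertionError): unequal lengths.
def Pre_convert_predicts_to_segments (predicts : List Int) (seq : String) : Prop :=
  predicts.length = seq.toList.length
instance (predicts : List Int) (seq : String) : Decidable (Pre_convert_predicts_to_segments predicts seq) := by unfold Pre_convert_predicts_to_segments; infer_instance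
def pvWitness_convert_predicts_to_segments : List Int × String := ([0, 1, 2], "abc")

def Spec_convert_predicts_to_segments (predicts : List Int) (seq : String) (out : List String) : Prop := out = convert_predicts_to_segments_alt predicts seq
instance (predicts : List Int) (seq : String) (out : List String) : Decidable (Spec_convert_predicts_to_segments predicts seq out) := by unfold Spec_convert_predicts_to_segments; infer_instance

-- ===== CLAIM (what is proved, stated in full; the proofs are below) =====
def Claim_equal_convert_predicts_to_segments : Prop := ∀ (predicts : List Int) (seq : String), Dom_convert_predicts_to_segments predicts seq → Pre_convert_predicts_to_segments predicts seq → Spec_convert_predicts_to_segments predicts seq (convert_predicts_to_segments predicts seq)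

-- ===== LEMMAS AND PROOFS =====

theorem pvLoopJ_le (p : List Int) (n j : Nat) (h : j ≤ n) : pvLoopJ p n j ≤ n := by
  unfold pvLoopJ
  split
  · exact pvLoopJ_le p n (j + 1) (by omega)
  · exact h
termination_by n - j
decreasing_by omega

theorem pvLoopJ_stop (p : List Int) (n j : Nat) (h : ¬(j < n ∧ p.getD j 0 ≠ 2)) :
    pvLoopJ p n j = j := by
  conv_lhs => rw [pvLoopJ]
  rw [dif_neg h]

theorem pvLoopJ_step (p : List Int) (n j : Nat) (h : j < n ∧ p.getD j 0 ≠ 2) :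
    pvLoopJ p n j = pvLoopJ p n (j + 1) := by
  conv_lhs => rw [pvLoopJ]
  rw [dif_pos h]

-- B inside a word opened at a, scanning from j, behaves like A's inner scan pvLoopJ from j
theorem pvGoB_inWord (p : List Int) (s : List Char) (j a : Nat) (segs : List String)
    (h : j ≤ s.length) :
    pvGoB p s j (some a) segs =
      if pvLoopJ p s.length j = s.length then segs ++ [pvSlice s a s.length]
      else pvGoB p s (pvLoopJ p s.length j + 1) none
        (segs ++ [pvSlice s a (pvLoopJ p s.length j + 1)]) := by
  by_cases hj : j < s.length
  · by_cases h2 : p.getD j 0 = 2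
    · rw [pvLoopJ_stop p s.length j (fun hx => hx.2 h2)]
      rw [if_neg (by omega : ¬ j = s.length)]
      conv_lhs => rw [pvGoB]
      rw [dif_pos hj, if_pos h2]
    · rw [pvLoopJ_step p s.length j ⟨hj, h2⟩]
      conv_lhs => rw [pvGoB]
      rw [dif_pos hj, if_neg h2]
      exact pvGoB_inWord p s (j + 1) a segs (by omega)
  · have hje : j = s.length := by omega
    rw [pvLoopJ_stop p s.length j (by omega)]
    rw [if_pos hje]
    conv_lhs => rw [pvGoB]
    rw [dif_neg hj]
termination_by s.length - j
decreasing_by omega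

theorem pvLoopA_eq_pvGoB (p : List Int) (s : List Char) (i : Nat) (segs : List String) :
    pvLoopA p s i segs = pvGoB p s i none segs := by
  by_cases hi : i < s.length
  · by_cases h0 : p.getD i 0 = 0
    · -- word case: B enters the in-word state, A's inner scan matches pvGoB_inWord
      conv_rhs => rw [pvGoB]
      rw [dif_pos hi, if_pos h0]
      rw [pvGoB_inWord p s (i + 1) i segs (by omega)]
      have hge := pvLoopJ_ge p s.length (i + 1)
      have hle := pvLoopJ_le p s.length (i + 1) (by omega)
      conv_lhs => rw [pvLoopA]
      rw [dif_pos hi, if_pos h0]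
      dsimp only
      by_cases hjn : pvLoopJ p s.length (i + 1) = s.length
      · rw [if_pos hjn, if_pos hjn]
        rw [if_neg (by omega : ¬(pvLoopJ p s.length (i + 1) + 1 < s.length ∧
              p.getD (pvLoopJ p s.length (i + 1) + 1) 0 ≠ 0))]
        conv_lhs => rw [pvLoopA]
        rw [dif_neg (by omega : ¬ pvLoopJ p s.length (i + 1) + 1 < s.length), hjn]
      · rw [if_neg hjn, if_neg hjn]
        by_cases hc : pvLoopJ p s.length (i + 1) + 1 < s.length ∧
            p.getD (pvLoopJ p s.length (i + 1) + 1) 0 ≠ 0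
        · rw [if_pos hc]
          conv_rhs => rw [pvGoB]
          rw [dif_pos hc.1, if_neg hc.2]
          exact pvLoopA_eq_pvGoB p s (pvLoopJ p s.length (i + 1) + 2) _
        · rw [if_neg hc]
          exact pvLoopA_eq_pvGoB p s (pvLoopJ p s.length (i + 1) + 1) _
    · -- single-element case on both sides
      conv_lhs => rw [pvLoopA]
      rw [dif_pos hi, if_neg h0]
      conv_rhs => rw [pvGoB]
      rw [dif_pos hi, if_neg h0]
      exact pvLoopA_eq_pvGoB p s (i + 1) _
  · conv_lhs => rw [pvLoopA]
    conv_rhs => rw [pvGoB]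
    rw [dif_neg hi, dif_neg hi]
termination_by s.length - i
decreasing_by
  · have := pvLoopJ_ge p s.length (i + 1); omega
  · have := pvLoopJ_ge p s.length (i + 1); omega
  · omega

-- ===== VERDICT (by name: the statement is the Claim_ definition above) =====
theorem convert_predicts_to_segments_spec : Claim_equal_convert_predicts_to_segments := by
  intro predicts seq _ _
  unfold Spec_convert_predicts_to_segments convert_predicts_to_segments convert_predicts_to_segments_alt
  exact pvLoopA_eq_pvGoB predicts seq.toList 0 []
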